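-- pv_equiv track=rewrite | github.com/Codestar007/PoP1_ExamPractice | AllRepos/assignment-three-sudoku-Codestar007/sudoku.py | getBoxLocations
-- ===== SOURCE A (Python) =====
-- def getBoxLocations(location):
--     """Return a list of all nine "locations"  (`(row, column)`  tuples)
--      in the same box as the given `location`.
--     """
--     location_list = []
--     row, col = location
--     box_start_coords = [(x, y) for x in range(0, 9, 3) for y in range(0, 9, 3)]
--     for elem in box_start_coords:
--         if row <= elem[0] + 2 and row >= elem[0] and col <= elem[1] + 2 and col >= elem[1]:
--             x_cord, y_cord = elem
--             location_list = [(x, y) for x in range(x_cord, x_cord + 3)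
--                              for y in range(y_cord, y_cord + 3)]
--             return location_list
-- ===== SOURCE B (Python) =====
-- def getBoxLocations(location):
--     """Return a list of all nine "locations" ((row, column) tuples)
--     in the same box as the given `location`, or None if the location
--     lies in no box (outside the 9x9 grid)."""
--     row, col = location
--     if not (0 <= row <= 8 and 0 <= col <= 8):
--         return None
--     x0 = (row // 3) * 3
--     y0 = (col // 3) * 3
--     return [(x, y) for x in range(x0, x0 + 3) for y in range(y0, y0 + 3)]
-- ===== Notes on version B (the rewrite author's own statement) =====
-- stated objective: simpler
-- what changed: Replaced the scan over all nine box-start coordinates with a direct floor-division computation of the box origin, building the nine cells in one comprehension.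
-- outside the precondition, e.g. on getBoxLocations((9, 0)): A returns None, B returns None
import Mathlib
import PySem

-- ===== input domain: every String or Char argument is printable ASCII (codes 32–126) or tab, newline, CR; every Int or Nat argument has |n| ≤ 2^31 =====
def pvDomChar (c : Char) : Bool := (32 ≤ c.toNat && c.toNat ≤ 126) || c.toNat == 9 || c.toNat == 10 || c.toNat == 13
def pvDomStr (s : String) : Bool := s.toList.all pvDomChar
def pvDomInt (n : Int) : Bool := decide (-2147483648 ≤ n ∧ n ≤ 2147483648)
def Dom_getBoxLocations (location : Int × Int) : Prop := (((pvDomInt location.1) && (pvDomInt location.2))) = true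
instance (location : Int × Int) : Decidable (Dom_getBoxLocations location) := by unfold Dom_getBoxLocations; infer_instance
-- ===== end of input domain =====

-- B computes the box origin by floor division instead of scanning the nine box starts (objective: simpler).

-- ===== PORT A =====
-- the early-returning loop over box_start_coords: first matching box start yields the
-- comprehension; if no box start matches, Python A falls through returning None
-- (excluded by Pre_; the port returns [] there, outside the claim).
def pvScanA (row col : Int) : List (Int × Int) → List (Int × Int)
  | [] => []
  | e :: rest =>
    if row ≤ e.1 + 2 ∧ row ≥ e.1 ∧ col ≤ e.2 + 2 ∧ col ≥ e.2 then
      (PySem.List.pyRange e.1 (e.1 + 3) 1).flatMap (fun x =>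
        (PySem.List.pyRange e.2 (e.2 + 3) 1).map (fun y => (x, y)))
    else pvScanA row col rest

def getBoxLocations (location : Int × Int) : List (Int × Int) :=
  let row := location.1
  let col := location.2
  let boxStartCoords :=
    (PySem.List.pyRange 0 9 3).flatMap (fun x =>
      (PySem.List.pyRange 0 9 3).map (fun y => (x, y)))
  pvScanA row col boxStartCoords

-- ===== PORT B =====
-- Source B returns None for a location outside the 9×9 grid (no box); those inputs are outside
-- Pre_ (None is not a list) and the port returns [] there, outside the claim.
def getBoxLocations_alt (location : Int × Int) : List (Int × Int) :=
  let row := location.1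
  let col := location.2
  if ¬ (0 ≤ row ∧ row ≤ 8 ∧ 0 ≤ col ∧ col ≤ 8) then []
  else
  let x0 := (PySem.Int.floordiv row 3) * 3
  let y0 := (PySem.Int.floordiv col 3) * 3
  (PySem.List.pyRange x0 (x0 + 3) 1).flatMap (fun x =>
    (PySem.List.pyRange y0 (y0 + 3) 1).map (fun y => (x, y)))

-- ===== PRECONDITION & SPEC =====
-- Pre_ excludes locations outside the 9×9 grid: there Python A falls through its loop and
-- returns None, which is not a list (see claim.json cites).
def Pre_getBoxLocations (location : Int × Int) : Prop :=
  0 ≤ location.1 ∧ location.1 ≤ 8 ∧ 0 ≤ location.2 ∧ location.2 ≤ 8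
instance (location : Int × Int) : Decidable (Pre_getBoxLocations location) := by
  unfold Pre_getBoxLocations; infer_instance
def pvWitness_getBoxLocations : (Int × Int) := (4, 7)

def Spec_getBoxLocations (location : Int × Int) (out : List (Int × Int)) : Prop :=
  out = getBoxLocations_alt location
instance (location : Int × Int) (out : List (Int × Int)) : Decidable (Spec_getBoxLocations location out) := by
  unfold Spec_getBoxLocations; infer_instance

-- ===== CLAIM (what is proved, stated in full; the proofs are below) =====
def Claim_equal_getBoxLocations : Prop := ∀ (location : Int × Int), Dom_getBoxLocations location → Pre_getBoxLocations location → Spec_getBoxLocations location (getBoxLocations location)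

-- ===== LEMMAS AND PROOFS =====

-- ===== VERDICT (by name: the statement is the Claim_ definition above) =====
theorem getBoxLocations_spec : Claim_equal_getBoxLocations := by
  intro ⟨row, col⟩ _ ⟨h1, h2, h3, h4⟩
  unfold Spec_getBoxLocations
  interval_cases row <;> interval_cases col <;> decide
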